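-- pv_equiv track=rewrite | github.com/sajadtorkamani/python-playground | katas/freed_prisoners/solution.py | freed_prisoners
-- ===== SOURCE A (Python) =====
-- from typing import List
--
-- def freed_prisoners(prison_cells: List[bool]) -> int:
--     if prison_cells[0] is False:
--         return 0
--
--     num_prisoners_freed = 0
--     current_cell_index = 0
--
--     while True in prison_cells[current_cell_index::]:
--         current_cell_index = unlock_prisoner(prison_cells, current_cell_index)
--         num_prisoners_freed += 1
--
--     return num_prisoners_freed
--
-- def unlock_prisoner(prison_cells: List[bool], current_cell_index: int) -> int | None:
--     for cell_index, is_cell_unlocked in enumerate(prison_cells):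
--         # Skip cells we've already visited
--         if cell_index < current_cell_index:
--             continue
--
--         # Free prison cell
--         if is_cell_unlocked:
--             flip_cell_locks(prison_cells)
--             return cell_index + 1
--
-- def flip_cell_locks(prison_cells: List[bool]) -> List[bool]:
--     for cell_index, is_cell_unlocked in enumerate(prison_cells):
--         prison_cells[cell_index] = not is_cell_unlocked
--
--     return prison_cells
-- ===== SOURCE B (Python) =====
-- def freed_prisoners(prison_cells):
--     # Single pass with flip parity; no mutation of the input list.
--     if not prison_cells or not prison_cells[0]:
--         return 0
--     count = 0
--     parity = False
--     for cell in prison_cells: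
--         if cell != parity:
--             count += 1
--             parity = not parity
--     return count
-- ===== Notes on version B (the rewrite author's own statement) =====
-- stated objective: simpler
-- what changed: Replaced A's repeated whole-list flips and rescans from the current index by a single left-to-right pass that tracks the flip parity, counting a prisoner freed whenever the stored cell value differs from the current parity (B also returns 0 on the empty list where A raises IndexError, and does not mutate the input list).
import Mathlib
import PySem

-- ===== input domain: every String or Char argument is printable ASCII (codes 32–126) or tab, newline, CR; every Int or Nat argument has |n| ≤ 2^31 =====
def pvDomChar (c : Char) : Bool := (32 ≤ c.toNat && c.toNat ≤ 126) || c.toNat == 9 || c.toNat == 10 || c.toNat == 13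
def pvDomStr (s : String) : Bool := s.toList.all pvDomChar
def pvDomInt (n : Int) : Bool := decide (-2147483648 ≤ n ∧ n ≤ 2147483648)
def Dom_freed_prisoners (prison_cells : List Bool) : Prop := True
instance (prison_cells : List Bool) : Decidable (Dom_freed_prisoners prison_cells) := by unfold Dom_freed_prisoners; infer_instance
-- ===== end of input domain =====

-- B replaces A's repeated whole-list flips and rescans by one short pass that tracks the
-- flip parity; equivalence is about the return value only — A also mutates its argument
-- in place (flips the list), B does not.

-- ===== PORT A =====

-- helper for the `for cell_index, is_cell_unlocked in enumerate(prison_cells)` loop of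
-- unlock_prisoner; the index is a non-negative int throughout, represented as Nat
def unlockGo : List (Bool × Nat) → Nat → Option Nat
  | [], _ => none
  | (b, i) :: t, cur =>
    if i < cur then unlockGo t cur              -- skip cells we've already visited
    else if b then some (i + 1)                 -- free prison cell: return cell_index + 1
    else unlockGo t cur

-- (the flip in Python happens just before the `return cell_index + 1`; since the flipped
-- list is the value of flip_cell_locks below, the caller applies it — same values)
def unlock_prisoner (prison_cells : List Bool) (current_cell_index : Nat) : Option Nat :=
  unlockGo prison_cells.zipIdx current_cell_index

-- `for cell_index, ...: prison_cells[cell_index] = not ...` sets every entry to its negation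
def flip_cell_locks (prison_cells : List Bool) : List Bool :=
  prison_cells.map (fun b => !b)

-- needed by loopA's decreasing_by
theorem unlockGo_gt (xs : List (Bool × Nat)) (cur j : Nat)
    (h : unlockGo xs cur = some j) : cur < j := by
  induction xs generalizing cur with
  | nil => simp [unlockGo] at h
  | cons p t ih =>
    obtain ⟨b, i⟩ := p
    by_cases hlt : i < cur
    · exact ih cur (by simpa [unlockGo, hlt] using h)
    · by_cases hb : b = true
      · have : i + 1 = j := by simpa [unlockGo, hlt, hb] using h
        omega
      · exact ih cur (by simpa [unlockGo, hlt, hb] using h)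

-- the `while True in prison_cells[current_cell_index::]` loop
-- (slice with a non-negative start = List.drop, cf. PySem.List.slice_from_natCast).
-- The `none` branch is unreachable: the guard guarantees unlock_prisoner finds a cell.
def loopA (prison_cells : List Bool) (current_cell_index : Nat) (num_prisoners_freed : Int) : Int :=
  if true ∈ prison_cells.drop current_cell_index then
    match h : unlock_prisoner prison_cells current_cell_index with
    | some j => loopA (flip_cell_locks prison_cells) j (num_prisoners_freed + 1)
    | none => num_prisoners_freed
  else num_prisoners_freed
termination_by prison_cells.length - current_cell_index
decreasing_by
  rename_i hmem
  have hj := unlockGo_gt _ _ _ h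
  have hlen : current_cell_index < prison_cells.length := by
    by_contra hc
    simp [List.drop_eq_nil_of_le (by omega : prison_cells.length ≤ current_cell_index)] at hmem
  simp only [flip_cell_locks, List.length_map]
  omega

def freed_prisoners (prison_cells : List Bool) : Int :=
  match PySem.List.pyGet? prison_cells 0 with
  | none => 0          -- prison_cells[0] raises IndexError (excluded by Pre_)
  | some c =>
    if c = false then 0
    else loopA prison_cells 0 0

-- ===== PORT B =====

-- the `for cell in prison_cells` loop with (parity, count) accumulators
def countLoop : List Bool → Bool → Int → Int
  | [], _, count => count
  | cell :: t, parity, count =>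
    if cell ≠ parity then countLoop t (!parity) (count + 1)
    else countLoop t parity count

def freed_prisoners_alt (prison_cells : List Bool) : Int :=
  match prison_cells with
  | [] => 0
  | c :: _ => if c = false then 0 else countLoop prison_cells false 0

-- ===== PRECONDITION & SPEC =====
-- Pre_ excludes only the empty list, on which A raises IndexError at prison_cells[0].
def Pre_freed_prisoners (prison_cells : List Bool) : Prop := prison_cells ≠ []
instance (prison_cells : List Bool) : Decidable (Pre_freed_prisoners prison_cells) := by
  unfold Pre_freed_prisoners; infer_instance

def pvWitness_freed_prisoners : List Bool := [true, false, true]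

def Spec_freed_prisoners (prison_cells : List Bool) (out : Int) : Prop := out = freed_prisoners_alt prison_cells
instance (prison_cells : List Bool) (out : Int) : Decidable (Spec_freed_prisoners prison_cells out) := by unfold Spec_freed_prisoners; infer_instance

-- ===== CLAIM (what is proved, stated in full; the proofs are below) =====
def Claim_equal_freed_prisoners : Prop := ∀ (prison_cells : List Bool), Dom_freed_prisoners prison_cells → Pre_freed_prisoners prison_cells → Spec_freed_prisoners prison_cells (freed_prisoners prison_cells)

-- ===== LEMMAS AND PROOFS =====

-- unlockGo skips every entry whose index is below cur
theorem unlockGo_skip (l : List Bool) (rest : List (Bool × Nat)) (k cur : Nat)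
    (h : k + l.length ≤ cur) :
    unlockGo (l.zipIdx k ++ rest) cur = unlockGo rest cur := by
  induction l generalizing k with
  | nil => simp
  | cons b t ih =>
    simp only [List.zipIdx_cons, List.cons_append, unlockGo]
    rw [if_pos (by simp at h; omega)]
    exact ih (k + 1) (by simp at h ⊢; omega)

-- past the skipped prefix, unlockGo finds the first true cell
theorem unlockGo_find (L1 L2 : List Bool) (k cur : Nat)
    (hcur : cur ≤ k) (hfalse : ∀ b ∈ L1, b = false) :
    unlockGo ((L1 ++ true :: L2).zipIdx k) cur = some (k + L1.length + 1) := by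
  induction L1 generalizing k with
  | nil => simp [unlockGo, Nat.not_lt.mpr hcur]
  | cons b t ih =>
    have hb : b = false := hfalse b (by simp)
    subst hb
    simp only [List.cons_append, List.zipIdx_cons, unlockGo]
    rw [if_neg (by omega), if_neg (by simp)]
    rw [ih (k + 1) (by omega) (fun x hx => hfalse x (by simp [hx]))]
    simp only [List.length_cons]
    congr 1
    omega

-- any list with a true entry splits at its first true entry
theorem first_true_split (l : List Bool) (h : true ∈ l) :
    ∃ L1 L2, l = L1 ++ true :: L2 ∧ ∀ b ∈ L1, b = false := by
  induction l with
  | nil => simp at h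
  | cons b t ih =>
    by_cases hb : b = true
    · exact ⟨[], t, by simp [hb], by simp⟩
    · have hm : true ∈ t := by
        rcases List.mem_cons.mp h with h1 | h1
        · exact absurd h1.symm hb
        · exact h1
      obtain ⟨L1, L2, heq, hf⟩ := ih hm
      exact ⟨b :: L1, L2, by simp [heq], by
        intro x hx
        rcases List.mem_cons.mp hx with h1 | h1
        · simp [h1]; simpa using hb
        · exact hf x h1⟩

-- countLoop over an all-false prefix with parity false does nothing
theorem countLoop_false_prefix (L1 r : List Bool) (c : Int)
    (hfalse : ∀ b ∈ L1, b = false) :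
    countLoop (L1 ++ r) false c = countLoop r false c := by
  induction L1 with
  | nil => rfl
  | cons b t ih =>
    have hb : b = false := hfalse b (by simp)
    simp only [List.cons_append, countLoop, hb]
    exact ih (fun x hx => hfalse x (by simp [hx]))

-- flipping every cell is the same as flipping the parity
theorem countLoop_map_not (l : List Bool) (p : Bool) (c : Int) :
    countLoop (l.map (fun b => !b)) p c = countLoop l (!p) c := by
  induction l generalizing p c with
  | nil => rfl
  | cons b t ih =>
    cases b <;> cases p <;> simp [countLoop, ih]

-- main invariant: A's while-loop counts exactly what B's parity pass counts on the suffix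
theorem loopA_eq (m : Nat) : ∀ (cells : List Bool) (idx : Nat) (count : Int),
    cells.length - idx ≤ m →
    loopA cells idx count = countLoop (cells.drop idx) false count := by
  induction m with
  | zero =>
    intro cells idx count hm
    have hdrop : cells.drop idx = [] := List.drop_eq_nil_of_le (by omega)
    rw [loopA, hdrop]
    simp [countLoop]
  | succ m ih =>
    intro cells idx count hm
    rw [loopA]
    by_cases hmem : true ∈ cells.drop idx
    · rw [if_pos hmem]
      have hlen : idx < cells.length := by
        by_contra hc
        simp [List.drop_eq_nil_of_le (by omega : cells.length ≤ idx)] at hmem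
      obtain ⟨L1, L2, heq, hfalse⟩ := first_true_split _ hmem
      -- compute unlock_prisoner cells idx
      have hz : cells.zipIdx = (List.take idx cells).zipIdx ++
          (cells.drop idx).zipIdx idx := by
        conv_lhs => rw [← List.take_append_drop idx cells]
        rw [List.zipIdx_append]
        congr 2
        simp [List.length_take, Nat.min_eq_left (le_of_lt hlen)]
      have hunlock : unlock_prisoner cells idx = some (idx + L1.length + 1) := by
        rw [unlock_prisoner, hz,
          unlockGo_skip _ _ 0 idx (by simp [List.length_take]), heq]
        exact unlockGo_find L1 L2 idx idx le_rfl hfalse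
      -- the drop after the step is L2
      have hdrop2 : cells.drop (idx + L1.length + 1) = L2 := by
        have h' : idx + L1.length + 1 = idx + (L1.length + 1) := by omega
        rw [h', ← List.drop_drop, heq]
        simp
      split
      · rename_i j hj
        rw [hunlock] at hj
        injection hj with hj
        subst hj
        rw [ih (flip_cell_locks cells) (idx + L1.length + 1) (count + 1)
          (by simp [flip_cell_locks]; omega)]
        rw [flip_cell_locks, ← List.map_drop, hdrop2, countLoop_map_not]
        rw [heq, countLoop_false_prefix L1 _ count hfalse]
        simp [countLoop]
      · rename_i hj
        rw [hunlock] at hj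
        exact absurd hj (by simp)
    · rw [if_neg hmem]
      have hall : ∀ b ∈ cells.drop idx, b = false := by
        intro b hb
        cases b
        · rfl
        · exact absurd hb hmem
      rw [← List.append_nil (cells.drop idx), countLoop_false_prefix _ _ _ hall]
      rfl

-- ===== VERDICT (by name: the statement is the Claim_ definition above) =====
theorem freed_prisoners_spec : Claim_equal_freed_prisoners := by
  intro cells _ hpre
  unfold Spec_freed_prisoners
  match cells with
  | [] => exact absurd rfl hpre
  | c :: t =>
    simp only [freed_prisoners, freed_prisoners_alt, PySem.List.pyGet?_zero_cons]
    by_cases hc : c = false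
    · simp [hc]
    · rw [if_neg hc, if_neg hc, loopA_eq (c :: t).length (c :: t) 0 0 (by omega)]
      rfl
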